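-- pv_equiv track=rewrite | github.com/zazabap/problem-reductions | docs/paper/verify-reductions/adversary_k_satisfiability_disjoint_connecting_paths.py | can_solve_dcp
-- ===== SOURCE A (Python) =====
-- def can_solve_dcp(nv: int, edges: list[tuple[int, int]],
--                   pairs: list[tuple[int, int]]) -> bool:
--     """Independent DCP solver (different implementation from verify script)."""
--     # Build adjacency with dict of lists (not defaultdict of sets)
--     adj: dict[int, list[int]] = {}
--     for u, v in edges:
--         adj.setdefault(u, []).append(v)
--         adj.setdefault(v, []).append(u)
--
--     def search(idx: int, blocked: set[int]) -> bool:
--         if idx == len(pairs):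
--             return True
--         src, dst = pairs[idx]
--         if src in blocked or dst in blocked:
--             return False
--         # BFS/DFS to find path
--         frontier = [(src, frozenset([src]))]
--         while frontier:
--             node, visited = frontier.pop()
--             if node == dst:
--                 if search(idx + 1, blocked | visited):
--                     return True
--                 continue
--             for nb in adj.get(node, []):
--                 if nb not in visited and nb not in blocked:
--                     frontier.append((nb, visited | frozenset([nb])))
--         return False
--
--     return search(0, set())
-- ===== SOURCE B (Python) =====
-- def can_solve_dcp(nv: int, edges: list[tuple[int, int]],
--                   pairs: list[tuple[int, int]]) -> bool:
--     """Recursive-DFS DCP solver (same result, different decomposition)."""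
--     adj: dict[int, list[int]] = {}
--     for u, v in edges:
--         adj.setdefault(u, []).append(v)
--         adj.setdefault(v, []).append(u)
--
--     def search(idx: int, blocked: set[int]) -> bool:
--         if idx == len(pairs):
--             return True
--         src, dst = pairs[idx]
--         if src in blocked or dst in blocked:
--             return False
--
--         def extend(node: int, visited: frozenset[int]) -> bool:
--             if node == dst:
--                 return search(idx + 1, blocked | visited)
--             for nb in adj.get(node, []):
--                 if nb not in visited and nb not in blocked:
--                     if extend(nb, visited | frozenset([nb])):
--                         return True
--             return False
--
--         return extend(src, frozenset([src]))
--
--     return search(0, set())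
-- ===== Notes on version B (the rewrite author's own statement) =====
-- stated objective: simpler
-- what changed: The per-pair path search no longer materialises an explicit frontier stack of (node, visited) states popped in LIFO order; B explores via a recursive DFS helper extend(node, visited) that backtracks through the call stack, keeping one visited set per call path.
import Mathlib
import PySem

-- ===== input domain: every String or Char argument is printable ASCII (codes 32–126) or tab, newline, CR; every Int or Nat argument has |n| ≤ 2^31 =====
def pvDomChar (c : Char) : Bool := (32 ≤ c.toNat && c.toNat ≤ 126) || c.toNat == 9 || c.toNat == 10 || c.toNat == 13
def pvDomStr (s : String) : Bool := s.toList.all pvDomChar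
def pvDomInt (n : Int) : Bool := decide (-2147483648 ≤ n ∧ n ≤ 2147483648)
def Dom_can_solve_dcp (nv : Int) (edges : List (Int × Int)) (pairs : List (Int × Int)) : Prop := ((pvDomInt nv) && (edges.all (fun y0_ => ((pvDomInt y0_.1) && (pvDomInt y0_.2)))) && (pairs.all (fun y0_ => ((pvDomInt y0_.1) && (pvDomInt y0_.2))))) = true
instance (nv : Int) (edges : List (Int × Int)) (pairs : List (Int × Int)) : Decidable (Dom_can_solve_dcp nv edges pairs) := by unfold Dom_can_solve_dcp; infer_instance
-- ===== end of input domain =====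

-- B replaces A's explicit frontier stack of (node, visited) states with a recursive DFS that
-- backtracks through the call stack; same result is proved, the objective is a simpler decomposition.


-- ===== PORT A =====
-- Termination-measure helpers (used by the ports' `termination_by`; the search state only ever
-- gains vertices that occur in some adjacency list, so the count of unvisited such vertices drops).
def pvUniv (adj : PySem.Dict Int (List Int)) : List Int :=
  PySem.List.dedup adj.values.flatten

def pvCnt (adj : PySem.Dict Int (List Int)) (vis : PySem.Set Int) : Nat :=
  ((pvUniv adj).filter (fun x => !(PySem.Set.contains vis x))).length

def pvDeg (adj : PySem.Dict Int (List Int)) : Nat :=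
  (adj.values.map List.length).sum

def pvWgt (adj : PySem.Dict Int (List Int)) (vis : PySem.Set Int) : Nat :=
  (pvDeg adj + 1) ^ (pvCnt adj vis + 1)

def pvMsr (adj : PySem.Dict Int (List Int)) (fr : List (Int × PySem.Set Int)) : Nat :=
  (fr.map (fun s => pvWgt adj s.2)).sum

-- facts the termination proofs cite
theorem pv_get?_mem_values (d : PySem.Dict Int (List Int)) (k : Int) (l : List Int)
    (hg : d.get? k = some l) : l ∈ d.values := by
  unfold PySem.Dict.get? at hg
  cases hf : List.find? (fun p => p.1 == k) d.items with
  | none => simp [hf] at hg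
  | some p =>
    rw [hf] at hg
    simp only [Option.map_some, Option.some.injEq] at hg
    exact hg ▸ List.mem_map.mpr ⟨p, List.mem_of_find?_eq_some hf, rfl⟩

theorem pv_mem_univ (adj : PySem.Dict Int (List Int)) (node x : Int)
    (hx : x ∈ adj.getD node []) : x ∈ pvUniv adj := by
  unfold PySem.Dict.getD at hx
  cases hg : adj.get? node with
  | none => rw [hg] at hx; simp at hx
  | some l =>
    rw [hg] at hx
    simp only [Option.getD_some] at hx
    have : x ∈ adj.values.flatten :=
      List.mem_flatten.mpr ⟨l, pv_get?_mem_values adj node l hg, hx⟩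
    unfold pvUniv
    rw [PySem.List.mem_dedup]
    exact this

theorem pv_cnt_mono (adj : PySem.Dict Int (List Int)) (vis vis' : PySem.Set Int)
    (h : ∀ x, PySem.Set.contains vis x = true → PySem.Set.contains vis' x = true) :
    pvCnt adj vis' ≤ pvCnt adj vis := by
  unfold pvCnt
  rw [← List.countP_eq_length_filter, ← List.countP_eq_length_filter]
  refine List.countP_mono_left ?_
  intro x _ hx
  rw [Bool.not_eq_true'] at hx ⊢
  cases hv : PySem.Set.contains vis x with
  | false => rfl
  | true => rw [h x hv] at hx; cases hx

theorem pv_cnt_add_lt (adj : PySem.Dict Int (List Int)) (vis : PySem.Set Int) (x : Int)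
    (hxU : x ∈ pvUniv adj) (hxv : PySem.Set.contains vis x = false) :
    pvCnt adj (PySem.Set.add vis x) < pvCnt adj vis := by
  unfold pvCnt
  have hcongr : (pvUniv adj).filter (fun y => !(PySem.Set.contains (PySem.Set.add vis x) y))
      = ((pvUniv adj).filter (fun y => !(PySem.Set.contains vis y))).filter (fun y => !(y == x)) := by
    rw [List.filter_filter]
    refine List.filter_congr ?_
    intro y _
    cases hy : PySem.Set.contains (PySem.Set.add vis x) y with
    | true =>
      rcases (PySem.Set.mem_add vis x y).mp ((PySem.Set.contains_iff (PySem.Set.add vis x) y).mp hy) with hm | hm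
      · rw [(PySem.Set.contains_iff vis y).mpr hm]; simp
      · subst hm; simp
    | false =>
      have h1 : PySem.Set.contains vis y = false := by
        cases hv : PySem.Set.contains vis y with
        | false => rfl
        | true =>
          have : PySem.Set.contains (PySem.Set.add vis x) y = true :=
            (PySem.Set.contains_iff _ y).mpr ((PySem.Set.mem_add vis x y).mpr
              (Or.inl ((PySem.Set.contains_iff vis y).mp hv)))
          rw [this] at hy; cases hy
      have h2 : ¬ (y = x) := by
        intro he; subst he
        have : PySem.Set.contains (PySem.Set.add vis y) y = true :=
          (PySem.Set.contains_iff _ y).mpr ((PySem.Set.mem_add vis y y).mpr (Or.inr rfl))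
        rw [this] at hy; cases hy
      have h3 : y ∉ vis := fun hm => by
        rw [(PySem.Set.contains_iff vis y).mpr hm] at h1; cases h1
      simp [h2, h3]
  rw [hcongr]
  have hxf : x ∈ (pvUniv adj).filter (fun y => !(PySem.Set.contains vis y)) :=
    List.mem_filter.mpr ⟨hxU, by rw [hxv]; rfl⟩
  exact List.length_filter_lt_length_iff_exists.mpr ⟨x, hxf, by simp⟩

theorem pv_getD_len_le (adj : PySem.Dict Int (List Int)) (node : Int) :
    (adj.getD node []).length ≤ pvDeg adj := by
  unfold PySem.Dict.getD pvDeg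
  cases hg : adj.get? node with
  | none => simp
  | some l =>
    simp only [Option.getD_some]
    exact List.single_le_sum (by intro x _; exact Nat.zero_le x) _
      (List.mem_map.mpr ⟨l, pv_get?_mem_values adj node l hg, rfl⟩)


theorem pv_cnt_single_le (adj : PySem.Dict Int (List Int)) (src : Int) :
    pvCnt adj (PySem.Set.ofList [src]) ≤ pvCnt adj PySem.Set.empty := by
  refine pv_cnt_mono adj _ _ ?_
  intro x hx
  have hm := (PySem.Set.contains_iff PySem.Set.empty x).mp hx
  simp [PySem.Set.empty] at hm

theorem pv_wgt_single_lt (adj : PySem.Dict Int (List Int)) (src : Int) :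
    pvMsr adj [(src, PySem.Set.ofList [src])] + 1 < pvWgt adj PySem.Set.empty + 2 := by
  have hc := pv_cnt_single_le adj src
  have hw : pvWgt adj (PySem.Set.ofList [src]) ≤ pvWgt adj PySem.Set.empty :=
    Nat.pow_le_pow_right (Nat.succ_le_succ (Nat.zero_le _)) (by omega)
  simp only [pvMsr, List.map_cons, List.map_nil, List.sum_cons, List.sum_nil]
  omega

theorem pv_msr_rest_lt (adj : PySem.Dict Int (List Int)) (node : Int) (visited : PySem.Set Int)
    (rest : List (Int × PySem.Set Int)) :
    pvMsr adj rest < pvMsr adj ((node, visited) :: rest) := by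
  have hpos : 0 < pvWgt adj visited := pow_pos (Nat.succ_pos _) _
  simp only [pvMsr, List.map_cons, List.sum_cons]
  omega

theorem pv_msr_children_lt (adj : PySem.Dict Int (List Int)) (visited blocked : PySem.Set Int)
    (node : Int) (rest : List (Int × PySem.Set Int)) :
    pvMsr adj
        (((adj.getD node []).filter
              (fun nb => !(PySem.Set.contains visited nb) && !(PySem.Set.contains blocked nb))).reverse.map
            (fun nb => (nb, PySem.Set.union visited [nb])) ++ rest)
      < pvMsr adj ((node, visited) :: rest) := by
  set l := (adj.getD node []).filter
      (fun nb => !(PySem.Set.contains visited nb) && !(PySem.Set.contains blocked nb)) with hl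
  have hchild : ∀ w ∈ (l.reverse.map (fun nb => (nb, PySem.Set.union visited [nb]))).map
      (fun s => pvWgt adj s.2), w ≤ (pvDeg adj + 1) ^ (pvCnt adj visited) := by
    intro w hw
    rcases List.mem_map.mp hw with ⟨s, hs, rfl⟩
    rcases List.mem_map.mp hs with ⟨nb, hnb, rfl⟩
    have hnb' : nb ∈ l := List.mem_reverse.mp hnb
    have hmem : nb ∈ adj.getD node [] := (List.mem_filter.mp hnb').1
    have hpred := (List.mem_filter.mp hnb').2
    have hnv : PySem.Set.contains visited nb = false := by
      rcases (Bool.and_eq_true _ _).mp hpred with ⟨h1, _⟩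
      rwa [Bool.not_eq_true'] at h1
    have hlt : pvCnt adj (PySem.Set.add visited nb) < pvCnt adj visited :=
      pv_cnt_add_lt adj visited nb (pv_mem_univ adj node nb hmem) hnv
    have : pvWgt adj (PySem.Set.union visited [nb]) = pvWgt adj (PySem.Set.add visited nb) := rfl
    rw [this]
    exact Nat.pow_le_pow_right (Nat.succ_le_succ (Nat.zero_le _)) (by omega)
  have hsum : ((l.reverse.map (fun nb => (nb, PySem.Set.union visited [nb]))).map
      (fun s => pvWgt adj s.2)).sum ≤ l.length * (pvDeg adj + 1) ^ (pvCnt adj visited) := by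
    have := List.sum_le_card_nsmul _ _ hchild
    simpa [smul_eq_mul] using this
  have hL : l.length ≤ pvDeg adj :=
    le_trans (by rw [hl]; exact List.length_filter_le _ _) (pv_getD_len_le adj node)
  have hW : 0 < (pvDeg adj + 1) ^ (pvCnt adj visited) := pow_pos (Nat.succ_pos _) _
  have hwgt : pvWgt adj visited = (pvDeg adj + 1) ^ (pvCnt adj visited) * (pvDeg adj + 1) := by
    simp [pvWgt, pow_succ]
  have hlt : l.length * (pvDeg adj + 1) ^ (pvCnt adj visited) < pvWgt adj visited := by
    rw [hwgt]
    calc l.length * (pvDeg adj + 1) ^ (pvCnt adj visited)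
        ≤ pvDeg adj * (pvDeg adj + 1) ^ (pvCnt adj visited) := Nat.mul_le_mul_right _ hL
      _ < (pvDeg adj + 1) * (pvDeg adj + 1) ^ (pvCnt adj visited) :=
          (Nat.mul_lt_mul_right hW).mpr (Nat.lt_succ_self _)
      _ = (pvDeg adj + 1) ^ (pvCnt adj visited) * (pvDeg adj + 1) := Nat.mul_comm _ _
  simp only [pvMsr, List.map_append, List.sum_append, List.map_cons, List.sum_cons]
  omega

-- adjacency construction (`adj.setdefault(u, []).append(v)` twice per edge)
def pvBuildAdjA (edges : List (Int × Int)) : PySem.Dict Int (List Int) :=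
  edges.foldl (fun d uv =>
    (d.modify uv.1 [] (fun l => l ++ [uv.2])).modify uv.2 [] (fun l => l ++ [uv.1]))
    PySem.Dict.empty

mutual
-- `search(idx, blocked)`: Python's `idx == len(pairs)` check and the (unreachable) `idx > len`
-- case are merged into the `¬ idx < len` branch returning True.
def pvSearchA (adj : PySem.Dict Int (List Int)) (pairs : List (Int × Int))
    (idx : Nat) (blocked : PySem.Set Int) : Bool :=
  if h : idx < pairs.length then
    let src := (pairs[idx]'h).1
    let dst := (pairs[idx]'h).2
    if PySem.Set.contains blocked src || PySem.Set.contains blocked dst then false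
    else pvLoopA adj pairs idx h blocked dst [(src, PySem.Set.ofList [src])]
  else true
termination_by (pairs.length - idx, pvWgt adj PySem.Set.empty + 2)
decreasing_by exact Prod.Lex.right _ (pv_wgt_single_lt adj _)

-- the `while frontier:` loop; the list head is the Python list's END (append/pop site)
def pvLoopA (adj : PySem.Dict Int (List Int)) (pairs : List (Int × Int))
    (idx : Nat) (h : idx < pairs.length) (blocked : PySem.Set Int) (dst : Int)
    (frontier : List (Int × PySem.Set Int)) : Bool :=
  match frontier with
  | [] => false
  | (node, visited) :: rest =>
    if node = dst then
      if pvSearchA adj pairs (idx + 1) (PySem.Set.union blocked visited) then true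
      else pvLoopA adj pairs idx h blocked dst rest
    else
      pvLoopA adj pairs idx h blocked dst
        ((((adj.getD node []).filter
              (fun nb => !(PySem.Set.contains visited nb) && !(PySem.Set.contains blocked nb))).reverse.map
            (fun nb => (nb, PySem.Set.union visited [nb]))) ++ rest)
termination_by (pairs.length - idx, pvMsr adj frontier + 1)
decreasing_by
  · exact Prod.Lex.left _ _ (by omega)
  · exact Prod.Lex.right _ (by have := pv_msr_rest_lt adj node visited rest; omega)
  · exact Prod.Lex.right _ (by have := pv_msr_children_lt adj visited blocked node rest; omega)
end


def can_solve_dcp (_nv : Int) (edges : List (Int × Int)) (pairs : List (Int × Int)) : Bool :=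
  pvSearchA (pvBuildAdjA edges) pairs 0 PySem.Set.empty

-- ===== PORT B =====
def pvBuildAdjB (edges : List (Int × Int)) (d : PySem.Dict Int (List Int)) :
    PySem.Dict Int (List Int) :=
  match edges with
  | [] => d
  | (u, v) :: rest =>
      pvBuildAdjB rest ((d.modify u [] (fun l => l ++ [v])).modify v [] (fun l => l ++ [u]))

mutual
def pvSearchB (adj : PySem.Dict Int (List Int)) (pairs : List (Int × Int))
    (idx : Nat) (blocked : PySem.Set Int) : Bool :=
  if h : idx < pairs.length then
    let src := (pairs[idx]'h).1
    let dst := (pairs[idx]'h).2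
    if PySem.Set.contains blocked src || PySem.Set.contains blocked dst then false
    else pvExtendB adj pairs idx h blocked dst src (PySem.Set.ofList [src])
  else true
termination_by (pairs.length - idx, 2 * pvCnt adj PySem.Set.empty + 3, 0)
decreasing_by
  exact Prod.Lex.right _ (Prod.Lex.left _ _ (by have := pv_cnt_single_le adj (pairs[idx]'h).1; omega))

-- `extend(node, visited)`
def pvExtendB (adj : PySem.Dict Int (List Int)) (pairs : List (Int × Int))
    (idx : Nat) (h : idx < pairs.length) (blocked : PySem.Set Int) (dst : Int)
    (node : Int) (visited : PySem.Set Int) : Bool :=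
  if node = dst then pvSearchB adj pairs (idx + 1) (PySem.Set.union blocked visited)
  else pvGoB adj pairs idx h blocked dst visited (adj.getD node [])
    (fun x hx => pv_mem_univ adj node x hx)
termination_by (pairs.length - idx, 2 * pvCnt adj visited + 2, 0)
decreasing_by
  · exact Prod.Lex.left _ _ (by omega)
  · exact Prod.Lex.right _ (Prod.Lex.left _ _ (by omega))

-- the `for nb in adj.get(node, []):` loop with its early `return True`
def pvGoB (adj : PySem.Dict Int (List Int)) (pairs : List (Int × Int))
    (idx : Nat) (h : idx < pairs.length) (blocked : PySem.Set Int) (dst : Int)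
    (visited : PySem.Set Int) (nbs : List Int)
    (hn : ∀ x ∈ nbs, x ∈ pvUniv adj) : Bool :=
  match nbs with
  | [] => false
  | nb :: rest =>
    if !(PySem.Set.contains visited nb) && !(PySem.Set.contains blocked nb) then
      if pvExtendB adj pairs idx h blocked dst nb (PySem.Set.union visited [nb]) then true
      else pvGoB adj pairs idx h blocked dst visited rest (fun x hx => hn x (List.mem_cons_of_mem _ hx))
    else pvGoB adj pairs idx h blocked dst visited rest (fun x hx => hn x (List.mem_cons_of_mem _ hx))
termination_by (pairs.length - idx, 2 * pvCnt adj visited + 1, nbs.length)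
decreasing_by
  · refine Prod.Lex.right _ (Prod.Lex.left _ _ ?_)
    have hnv : PySem.Set.contains visited nb = false := by
      have hg : (!(PySem.Set.contains visited nb) && !(PySem.Set.contains blocked nb)) = true := by assumption
      rcases (Bool.and_eq_true _ _).mp hg with ⟨h1, _⟩
      rwa [Bool.not_eq_true'] at h1
    have hlt : pvCnt adj (PySem.Set.add visited nb) < pvCnt adj visited :=
      pv_cnt_add_lt adj visited nb (hn nb List.mem_cons_self) hnv
    have : pvCnt adj (PySem.Set.union visited [nb]) = pvCnt adj (PySem.Set.add visited nb) := rfl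
    omega
  · exact Prod.Lex.right _ (Prod.Lex.right _ (by simp))
  · exact Prod.Lex.right _ (Prod.Lex.right _ (by simp))
end


def can_solve_dcp_alt (_nv : Int) (edges : List (Int × Int)) (pairs : List (Int × Int)) : Bool :=
  pvSearchB (pvBuildAdjB edges PySem.Dict.empty) pairs 0 PySem.Set.empty

-- ===== PRECONDITION & SPEC =====
def Spec_can_solve_dcp (nv : Int) (edges : List (Int × Int)) (pairs : List (Int × Int)) (out : Bool) : Prop := out = can_solve_dcp_alt nv edges pairs
instance (nv : Int) (edges : List (Int × Int)) (pairs : List (Int × Int)) (out : Bool) : Decidable (Spec_can_solve_dcp nv edges pairs out) := by unfold Spec_can_solve_dcp; infer_instance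

-- ===== CLAIM (what is proved, stated in full; the proofs are below) =====
def Claim_equal_can_solve_dcp : Prop := ∀ (nv : Int) (edges : List (Int × Int)) (pairs : List (Int × Int)), Dom_can_solve_dcp nv edges pairs → Spec_can_solve_dcp nv edges pairs (can_solve_dcp nv edges pairs)

-- ===== LEMMAS AND PROOFS =====
theorem pv_build_eq (edges : List (Int × Int)) (d : PySem.Dict Int (List Int)) :
    edges.foldl (fun d uv =>
      (d.modify uv.1 [] (fun l => l ++ [uv.2])).modify uv.2 [] (fun l => l ++ [uv.1])) d
    = pvBuildAdjB edges d := by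
  induction edges generalizing d with
  | nil => rfl
  | cons e rest ih => cases e; simp [pvBuildAdjB, List.foldl_cons, ih]

theorem pv_go_any (adj : PySem.Dict Int (List Int)) (pairs : List (Int × Int))
    (idx : Nat) (h : idx < pairs.length) (blocked : PySem.Set Int) (dst : Int)
    (visited : PySem.Set Int) (nbs : List Int) (hn : ∀ x ∈ nbs, x ∈ pvUniv adj) :
    pvGoB adj pairs idx h blocked dst visited nbs hn =
      nbs.any (fun nb =>
        (!(PySem.Set.contains visited nb) && !(PySem.Set.contains blocked nb)) &&
          pvExtendB adj pairs idx h blocked dst nb (PySem.Set.union visited [nb])) := by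
  revert hn
  induction nbs with
  | nil => intro hn; simp [pvGoB]
  | cons nb rest ih =>
    intro hn
    rw [pvGoB, List.any_cons, ih]
    by_cases hc : (!(PySem.Set.contains visited nb) && !(PySem.Set.contains blocked nb)) = true
    · rw [if_pos hc, hc, Bool.true_and]
      cases hx : pvExtendB adj pairs idx h blocked dst nb (PySem.Set.union visited [nb]) with
      | true => simp only [Bool.true_or, if_true]
      | false => simp only [Bool.false_or, Bool.false_eq_true, if_false]
    · rw [if_neg hc]
      rw [Bool.not_eq_true] at hc
      rw [hc, Bool.false_and, Bool.false_or]

theorem pv_loop_any (adj : PySem.Dict Int (List Int)) (pairs : List (Int × Int))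
    (idx : Nat) (h : idx < pairs.length) (blocked : PySem.Set Int) (dst : Int)
    (IH : ∀ blocked', pvSearchA adj pairs (idx + 1) blocked' = pvSearchB adj pairs (idx + 1) blocked')
    (frontier : List (Int × PySem.Set Int)) :
    pvLoopA adj pairs idx h blocked dst frontier =
      frontier.any (fun s => pvExtendB adj pairs idx h blocked dst s.1 s.2) := by
  have main : ∀ n fr, pvMsr adj fr ≤ n →
      pvLoopA adj pairs idx h blocked dst fr =
        fr.any (fun s => pvExtendB adj pairs idx h blocked dst s.1 s.2) := by
    intro n
    induction n with
    | zero =>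
      intro fr hle
      cases fr with
      | nil => simp [pvLoopA]
      | cons s rest =>
        obtain ⟨node, visited⟩ := s
        exfalso
        have := pv_msr_rest_lt adj node visited rest
        omega
    | succ n ihn =>
      intro fr hle
      cases fr with
      | nil => simp [pvLoopA]
      | cons s rest =>
        obtain ⟨node, visited⟩ := s
        rw [pvLoopA]
        by_cases hnd : node = dst
        · rw [if_pos hnd]
          have hext : pvExtendB adj pairs idx h blocked dst node visited =
              pvSearchA adj pairs (idx + 1) (PySem.Set.union blocked visited) := by
            rw [pvExtendB, if_pos hnd, IH]
          cases hs : pvSearchA adj pairs (idx + 1) (PySem.Set.union blocked visited) with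
          | true => simp [List.any_cons, hext, hs]
          | false =>
            rw [if_neg (by simp only [Bool.false_eq_true, not_false_eq_true])]
            have hrest : pvMsr adj rest ≤ n := by
              have := pv_msr_rest_lt adj node visited rest; omega
            simp [ihn rest hrest, List.any_cons, hext, hs]
        · rw [if_neg hnd]
          have hch : pvMsr adj
              (((adj.getD node []).filter
                    (fun nb => !(PySem.Set.contains visited nb) && !(PySem.Set.contains blocked nb))).reverse.map
                  (fun nb => (nb, PySem.Set.union visited [nb])) ++ rest) ≤ n := by
            have := pv_msr_children_lt adj visited blocked node rest; omega
          rw [ihn _ hch]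
          have hext : pvExtendB adj pairs idx h blocked dst node visited =
              (adj.getD node []).any (fun nb =>
                (!(PySem.Set.contains visited nb) && !(PySem.Set.contains blocked nb)) &&
                  pvExtendB adj pairs idx h blocked dst nb (PySem.Set.union visited [nb])) := by
            rw [pvExtendB, if_neg hnd, pv_go_any]
          rw [List.any_append, List.any_map, List.any_reverse, List.any_filter, List.any_cons, hext]
          rfl
  exact main (pvMsr adj frontier) frontier le_rfl

theorem pv_search_eq (adj : PySem.Dict Int (List Int)) (pairs : List (Int × Int))
    (idx : Nat) (blocked : PySem.Set Int) :
    pvSearchA adj pairs idx blocked = pvSearchB adj pairs idx blocked := by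
  have main : ∀ n idx blocked, pairs.length - idx ≤ n →
      pvSearchA adj pairs idx blocked = pvSearchB adj pairs idx blocked := by
    intro n
    induction n with
    | zero =>
      intro idx blocked hle
      have hnl : ¬ idx < pairs.length := by omega
      rw [pvSearchA, pvSearchB, dif_neg hnl, dif_neg hnl]
    | succ n ihn =>
      intro idx blocked hle
      by_cases h : idx < pairs.length
      · rw [pvSearchA, pvSearchB, dif_pos h, dif_pos h]
        by_cases hb : (PySem.Set.contains blocked (pairs[idx]'h).1 ||
            PySem.Set.contains blocked (pairs[idx]'h).2) = true
        · simp only [hb, if_true]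
        · simp only [Bool.not_eq_true] at hb
          simp only [hb, Bool.false_eq_true, if_false]
          rw [pv_loop_any adj pairs idx h blocked (pairs[idx]'h).2
              (fun blocked' => ihn (idx + 1) blocked' (by omega))]
          simp [List.any_cons]
      · rw [pvSearchA, pvSearchB, dif_neg h, dif_neg h]
  exact main (pairs.length - idx) idx blocked le_rfl

-- ===== VERDICT (by name: the statement is the Claim_ definition above) =====
theorem can_solve_dcp_spec : Claim_equal_can_solve_dcp := by
  intro nv edges pairs _
  unfold Spec_can_solve_dcp can_solve_dcp can_solve_dcp_alt pvBuildAdjA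
  rw [pv_build_eq]
  exact pv_search_eq _ _ _ _
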